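-- pv_equiv track=rewrite | github.com/Mayersteen/AIND-Sudoku | solution.py | checkDiagonalConstraint
-- ===== SOURCE A (Python) =====
-- def checkDiagonalConstraint(diagonal, values):
--     """
--     Checks the uniqueness constraint for a single diagonal.
--     Input: List of diagonals
--     Output: True if the constraint is hurt
--             False if the constraint is met
--     """
--     seen = []
--
--     for box in diagonal:
--         if len(values[box]) == 1:
--             for value in values[box]:
--                 if value in seen:
--                     return True  # if value was already seen, return true
--                 seen.append(value)
--
--     return False
-- ===== SOURCE B (Python) =====
-- def checkDiagonalConstraint(diagonal, values):
--     """
--     Checks the uniqueness constraint for a single diagonal.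
--     Returns True iff some filled (single-value) box value repeats.
--     Strategy: sort the filled values, then scan adjacent pairs for equality
--     (in a sorted sequence duplicates are always adjacent).
--     """
--     filled = sorted(values[box] for box in diagonal if len(values[box]) == 1)
--     return any(a == b for a, b in zip(filled, filled[1:]))
-- ===== Notes on version B (the rewrite author's own statement) =====
-- stated objective: alternative
-- what changed: Replaces the incremental 'seen'-list membership scan with a sort-then-adjacent-scan duplicate check: the filled values are collected, sorted, and a duplicate is reported iff two equal values are adjacent.
-- outside the precondition, e.g. on checkDiagonalConstraint(['zb', 'zb', 'c'], {'zb': 'c'}): A returns True, B raises KeyError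
import Mathlib
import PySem

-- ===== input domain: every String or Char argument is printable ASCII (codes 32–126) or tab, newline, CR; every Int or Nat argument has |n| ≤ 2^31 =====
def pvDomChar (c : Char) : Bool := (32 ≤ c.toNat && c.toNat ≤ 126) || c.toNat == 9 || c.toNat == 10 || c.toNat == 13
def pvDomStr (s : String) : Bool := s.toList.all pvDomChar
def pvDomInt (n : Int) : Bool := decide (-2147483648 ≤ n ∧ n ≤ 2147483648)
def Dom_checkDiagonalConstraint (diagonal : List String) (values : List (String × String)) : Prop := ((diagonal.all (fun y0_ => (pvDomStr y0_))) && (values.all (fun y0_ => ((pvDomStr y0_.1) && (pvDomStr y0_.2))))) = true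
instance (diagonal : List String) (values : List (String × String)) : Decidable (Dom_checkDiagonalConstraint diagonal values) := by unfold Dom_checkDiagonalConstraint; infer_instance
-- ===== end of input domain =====

-- B replaces A's incremental 'seen'-list membership scan by sort-then-adjacent-scan:
-- collect the filled values, sort them, report a duplicate iff two equal values are
-- adjacent (objective: alternative algorithm).

-- ===== PORT A =====
-- inner `for value in values[box]: if value in seen: return True; seen.append(value)`
def pvInnerA (chars : List Char) (seen : List Char) : Bool × List Char :=
  match chars with
  | [] => (false, seen)
  | c :: rest => if seen.contains c then (true, seen) else pvInnerA rest (seen ++ [c])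

-- outer `for box in diagonal:` loop; `values[box]` raises KeyError when absent (excluded by Pre_)
def pvGoA (d : PySem.Dict String String) : List String → List Char → Bool
  | [], _ => false
  | box :: rest, seen =>
    match d.get? box with
    | none => false  -- Python raises KeyError here; such inputs are outside Pre_
    | some s =>
      if PySem.Str.len s == 1 then
        match pvInnerA s.toList seen with
        | (true, _) => true
        | (false, seen') => pvGoA d rest seen'
      else pvGoA d rest seen

def checkDiagonalConstraint (diagonal : List String) (values : List (String × String)) : Bool :=
  pvGoA (PySem.Dict.mk values) diagonal []

-- ===== PORT B =====
-- the generator's filter: keep values[box] when it has exactly one value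
def pvKeep (o : Option String) : Option String :=
  match o with
  | some s => if PySem.Str.len s == 1 then some s else none
  | none => none  -- Python raises KeyError here; such inputs are outside Pre_

-- (values[box] for box in diagonal if len(values[box]) == 1)
def pvFilledB (d : PySem.Dict String String) (diagonal : List String) : List String :=
  diagonal.filterMap (fun box => pvKeep (d.get? box))

-- any(a == b for a, b in zip(filled, filled[1:])): adjacent-pair scan
def pvAdjDup : List String → Bool
  | x :: y :: rest => x == y || pvAdjDup (y :: rest)
  | _ => false

-- filled = sorted(...); return any adjacent equal pair
def checkDiagonalConstraint_alt (diagonal : List String) (values : List (String × String)) : Bool :=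
  pvAdjDup (PySem.List.sorted (pvFilledB (PySem.Dict.mk values) diagonal) (fun x => x) false)

-- ===== PRECONDITION & SPEC =====
-- Pre_ excludes the inputs on which some diagonal box is missing from values: there both
-- programs raise KeyError on lookup, except that A may early-return True on a duplicate found
-- before reaching the missing key, where B (which looks up every box first) still raises.
def Pre_checkDiagonalConstraint (diagonal : List String) (values : List (String × String)) : Prop :=
  ∀ box ∈ diagonal, ((PySem.Dict.mk values).get? box).isSome = true
instance (diagonal : List String) (values : List (String × String)) : Decidable (Pre_checkDiagonalConstraint diagonal values) := by unfold Pre_checkDiagonalConstraint; infer_instance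

def pvWitness_checkDiagonalConstraint : List String × (List (String × String)) :=
  (["A1", "B2"], [("A1", "1"), ("B2", "23")])

def Spec_checkDiagonalConstraint (diagonal : List String) (values : List (String × String)) (out : Bool) : Prop := out = checkDiagonalConstraint_alt diagonal values
instance (diagonal : List String) (values : List (String × String)) (out : Bool) : Decidable (Spec_checkDiagonalConstraint diagonal values out) := by unfold Spec_checkDiagonalConstraint; infer_instance

-- ===== CLAIM (what is proved, stated in full; the proofs are below) =====
def Claim_equal_checkDiagonalConstraint : Prop := ∀ (diagonal : List String) (values : List (String × String)), Dom_checkDiagonalConstraint diagonal values → Pre_checkDiagonalConstraint diagonal values → Spec_checkDiagonalConstraint diagonal values (checkDiagonalConstraint diagonal values)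

-- ===== LEMMAS AND PROOFS =====

theorem pvWitness_ok :
    Dom_checkDiagonalConstraint pvWitness_checkDiagonalConstraint.1 pvWitness_checkDiagonalConstraint.2 ∧
    Pre_checkDiagonalConstraint pvWitness_checkDiagonalConstraint.1 pvWitness_checkDiagonalConstraint.2 := by
  decide

-- strings of length 1 are determined by (and determine) their single character
theorem toList_singleton_of_len_one (s : String) (h : (PySem.Str.len s == 1) = true) :
    s.toList = [s.toList.headI] := by
  have h1 : s.toList.length = 1 := by
    have := of_decide_eq_true h
    rw [PySem.Str.len_eq] at this
    exact_mod_cast this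
  match hs : s.toList, h1 with
  | [c], _ => simp

-- every filled value has exactly one character
theorem mem_filledB_len (d : PySem.Dict String String) (diag : List String) (s : String)
    (h : s ∈ pvFilledB d diag) : (PySem.Str.len s == 1) = true := by
  simp only [pvFilledB, List.mem_filterMap] at h
  obtain ⟨box, _, hk⟩ := h
  cases hg : d.get? box with
  | none => rw [hg] at hk; simp [pvKeep] at hk
  | some t =>
    rw [hg] at hk
    simp only [pvKeep] at hk
    split at hk
    · next hl => cases hk; exact hl
    · cases hk

-- duplicates among the filled 1-char strings are exactly duplicates among their characters
theorem nodup_map_headI (fs : List String) (hlen : ∀ s ∈ fs, (PySem.Str.len s == 1) = true) :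
    (fs.map (fun s => s.toList.headI)).Nodup ↔ fs.Nodup := by
  induction fs with
  | nil => simp
  | cons s rest ih =>
    have hs := hlen s (by simp)
    have hrest : ∀ t ∈ rest, (PySem.Str.len t == 1) = true := fun t ht => hlen t (by simp [ht])
    simp only [List.map_cons, List.nodup_cons]
    rw [ih hrest]
    constructor
    · rintro ⟨hnm, hnd⟩
      refine ⟨fun hmem => hnm ?_, hnd⟩
      exact List.mem_map.mpr ⟨s, hmem, rfl⟩
    · rintro ⟨hnm, hnd⟩
      refine ⟨fun hmem => ?_, hnd⟩
      obtain ⟨t, htmem, hteq⟩ := List.mem_map.mp hmem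
      apply hnm
      have hts : t = s := by
        apply fun h => String.toList_inj.mp h
        rw [toList_singleton_of_len_one t (hrest t htmem), toList_singleton_of_len_one s hs, hteq]
      rwa [hts] at htmem

-- A's loop computes "some duplicate among seen ++ characters of the filled boxes"
theorem pvGoA_char (d : PySem.Dict String String) (diag : List String) (seen : List Char)
    (hpre : ∀ box ∈ diag, (d.get? box).isSome = true) (hseen : seen.Nodup) :
    pvGoA d diag seen =
      !decide ((seen ++ (pvFilledB d diag).map (fun s => s.toList.headI)).Nodup) := by
  induction diag generalizing seen with
  | nil => simp [pvGoA, pvFilledB, hseen]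
  | cons box rest ih =>
    have hbox := hpre box (by simp)
    have hrest : ∀ b ∈ rest, (d.get? b).isSome = true := fun b hb => hpre b (by simp [hb])
    obtain ⟨s, hs⟩ := Option.isSome_iff_exists.mp hbox
    simp only [pvGoA, hs]
    by_cases hlen : (PySem.Str.len s == 1) = true
    · rw [if_pos hlen]
      have hsl := toList_singleton_of_len_one s hlen
      set c := s.toList.headI with hc
      rw [hsl]
      have hf : pvKeep (d.get? box) = some s := by
        rw [hs]
        simp only [pvKeep]
        rw [if_pos hlen]
      have hfill : pvFilledB d (box :: rest) = s :: pvFilledB d rest := by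
        simp only [pvFilledB, List.filterMap_cons, hf]
      rw [hfill]
      by_cases hmem : c ∈ seen
      · have hinner : pvInnerA [c] seen = (true, seen) := by
          simp [pvInnerA, hmem]
        simp only [hinner]
        rw [List.map_cons, ← hc]
        have hnot : ¬ (seen ++ c :: (pvFilledB d rest).map (fun s => s.toList.headI)).Nodup := by
          intro h
          exact (List.disjoint_of_nodup_append h) hmem (by simp)
        simp [hnot]
      · have hinner : pvInnerA [c] seen = (false, seen ++ [c]) := by
          simp [pvInnerA, hmem]
        simp only [hinner]
        have hnodup : (seen ++ [c]).Nodup := by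
          refine List.Nodup.append hseen (List.nodup_singleton c) ?_
          intro a ha hac
          simp at hac
          exact hmem (hac ▸ ha)
        rw [ih (seen ++ [c]) hrest hnodup]
        congr 1
        rw [List.map_cons, ← hc]
        simp
    · rw [if_neg hlen]
      have hf : pvKeep (d.get? box) = none := by
        rw [hs]
        simp only [pvKeep]
        rw [if_neg hlen]
      have hfill : pvFilledB d (box :: rest) = pvFilledB d rest := by
        simp only [pvFilledB, List.filterMap_cons, hf]
      rw [hfill]
      exact ih seen hrest hseen

-- on a list sorted in nondecreasing order, an adjacent equal pair exists iff there is a duplicate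
theorem adjDup_eq_not_nodup (l : List String) (hsort : l.Pairwise (· ≤ ·)) :
    pvAdjDup l = !decide l.Nodup := by
  induction l with
  | nil => simp [pvAdjDup]
  | cons x t ih =>
    cases t with
    | nil => simp [pvAdjDup]
    | cons y rest =>
      have hx : ∀ z ∈ y :: rest, x ≤ z := fun z hz => (List.pairwise_cons.mp hsort).1 z hz
      have htail : (y :: rest).Pairwise (· ≤ ·) := (List.pairwise_cons.mp hsort).2
      by_cases hxy : x = y
      · subst hxy
        have : ¬ (x :: x :: rest).Nodup := by
          simp [List.nodup_cons]
        simp [pvAdjDup, this]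
      · have hxr : x ∉ y :: rest := by
          intro hmem
          rcases List.mem_cons.mp hmem with h | h
          · exact hxy h
          · -- x ∈ rest: then y ≤ x (pairwise from y) and x ≤ y, so x = y
            have hyx : y ≤ x := (List.pairwise_cons.mp htail).1 x h
            have hxley : x ≤ y := hx y (by simp)
            exact hxy (le_antisymm hxley hyx)
        have hbeq : (x == y) = false := by
          simp [hxy]
        simp only [pvAdjDup, hbeq, Bool.false_or]
        rw [ih htail]
        have : (x :: y :: rest).Nodup ↔ (y :: rest).Nodup := by
          rw [List.nodup_cons]
          exact ⟨fun h => h.2, fun h => ⟨hxr, h⟩⟩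
        simp [this]

-- ===== VERDICT (by name: the statement is the Claim_ definition above) =====
theorem checkDiagonalConstraint_spec : Claim_equal_checkDiagonalConstraint := by
  intro diagonal values _ hpre
  unfold Spec_checkDiagonalConstraint checkDiagonalConstraint checkDiagonalConstraint_alt
  set d := PySem.Dict.mk values with hd
  set fs := pvFilledB d diagonal with hfs
  rw [pvGoA_char d diagonal [] hpre List.nodup_nil]
  have hlen : ∀ s ∈ fs, (PySem.Str.len s == 1) = true := fun s hsm => mem_filledB_len d diagonal s hsm
  have hA : (([] : List Char) ++ fs.map (fun s => s.toList.headI)).Nodup ↔ fs.Nodup := by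
    rw [List.nil_append]; exact nodup_map_headI fs hlen
  have hsorted : (PySem.List.sorted fs (fun x => x) false).Pairwise (· ≤ ·) :=
    PySem.List.sorted_pairwise fs (fun x => x)
  rw [adjDup_eq_not_nodup _ hsorted]
  have hperm : (PySem.List.sorted fs (fun x => x) false).Perm fs :=
    PySem.List.sorted_perm fs (fun x => x) false
  rw [show decide (PySem.List.sorted fs (fun x => x) false).Nodup = decide fs.Nodup from
      decide_eq_decide.mpr hperm.nodup_iff]
  congr 1
  exact decide_eq_decide.mpr hA
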